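-- pv_equiv track=rewrite | github.com/HarrisonMc555/adventofcode | 2015/day17b.py | helper
-- ===== SOURCE A (Python) =====
-- def helper(nums, cur, length):
--     if cur < 0:
--         return 0
--     if cur == 0:
--         if length == 0:
--             return 1
--         else:
--             return 0
--     if not nums:
--         return 0
--     num = nums[0]
--     rest = nums[1:]
--     return helper(rest, cur, length) + helper(rest, cur - num, length - 1)
-- ===== SOURCE B (Python) =====
-- def helper(nums, cur, length):
--     # Iterative breadth-first DP: a dict of (remaining sum, remaining count) states with
--     # multiplicities, pruned/resolved per state exactly as the recursion prunes per path.
--     states = {(cur, length): 1}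
--     total = 0
--     for num in nums:
--         new = {}
--         for (c, l), k in states.items():
--             if c < 0:
--                 continue
--             if c == 0:
--                 if l == 0:
--                     total += k
--                 continue
--             new[(c, l)] = new.get((c, l), 0) + k
--             new[(c - num, l - 1)] = new.get((c - num, l - 1), 0) + k
--         states = new
--     for (c, l), k in states.items():
--         if c == 0 and l == 0:
--             total += k
--     return total
-- ===== Notes on version B (the rewrite author's own statement) =====
-- stated objective: alternative
-- what changed: Replaces the top-down branching recursion by an iterative breadth-first DP that keeps a dict mapping (remaining sum, remaining count) states to their multiplicities, applying A's prune/resolve rules to aggregated states instead of to individual recursion paths; states with equal (sum,count) are merged, which helps on dense/small values but not on random 32-bit values.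
import Mathlib
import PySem

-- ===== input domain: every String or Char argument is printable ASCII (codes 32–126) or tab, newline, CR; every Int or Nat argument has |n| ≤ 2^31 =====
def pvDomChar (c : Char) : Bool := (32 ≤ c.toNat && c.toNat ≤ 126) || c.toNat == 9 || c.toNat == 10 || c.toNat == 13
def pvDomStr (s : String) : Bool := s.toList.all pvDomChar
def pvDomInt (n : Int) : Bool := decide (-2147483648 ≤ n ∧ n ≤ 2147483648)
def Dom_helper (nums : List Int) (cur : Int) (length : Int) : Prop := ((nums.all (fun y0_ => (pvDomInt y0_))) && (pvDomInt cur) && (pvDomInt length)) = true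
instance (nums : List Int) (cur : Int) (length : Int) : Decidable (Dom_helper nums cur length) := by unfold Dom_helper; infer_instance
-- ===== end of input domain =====

-- B replaces A's branching recursion by an iterative breadth-first DP over a dict of
-- (remaining sum, remaining count) states with multiplicities (objective: alternative).

-- ===== PORT A =====
def helper (nums : List Int) (cur : Int) (length : Int) : Int :=
  if cur < 0 then 0
  else if cur = 0 then (if length = 0 then 1 else 0)
  else
    match nums with
    | [] => 0
    | num :: rest => helper rest cur length + helper rest (cur - num) (length - 1)

-- ===== PORT B =====
-- one pass of B's inner loop: 'for (c, l), k in states.items(): …' building 'new' and adding to 'total'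
def bStep (num : Int) (st : PySem.Dict (Int × Int) Int × Int) : PySem.Dict (Int × Int) Int × Int :=
  st.1.items.foldl (fun acc p =>
    if p.1.1 < 0 then acc
    else if p.1.1 = 0 then (if p.1.2 = 0 then (acc.1, acc.2 + p.2) else acc)
    else
      let d1 := acc.1.insert p.1 (acc.1.getD p.1 0 + p.2)
      (d1.insert (p.1.1 - num, p.1.2 - 1) (d1.getD (p.1.1 - num, p.1.2 - 1) 0 + p.2), acc.2))
    (PySem.Dict.empty, st.2)

def helper_alt (nums : List Int) (cur : Int) (length : Int) : Int :=
  let st := nums.foldl (fun st num => bStep num st) (PySem.Dict.empty.insert (cur, length) 1, 0)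
  st.1.items.foldl (fun t p => if p.1.1 = 0 ∧ p.1.2 = 0 then t + p.2 else t) st.2

-- ===== PRECONDITION & SPEC =====
def Spec_helper (nums : List Int) (cur : Int) (length : Int) (out : Int) : Prop := out = helper_alt nums cur length
instance (nums : List Int) (cur : Int) (length : Int) (out : Int) : Decidable (Spec_helper nums cur length out) := by unfold Spec_helper; infer_instance

-- ===== CLAIM (what is proved, stated in full; the proofs are below) =====
def Claim_equal_helper : Prop := ∀ (nums : List Int) (cur : Int) (length : Int), Dom_helper nums cur length → Spec_helper nums cur length (helper nums cur length)

-- ===== LEMMAS AND PROOFS =====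

-- weighted sum of a state list under a value function f
def dsumF (f : Int × Int → Int) (l : List ((Int × Int) × Int)) : Int :=
  (l.map (fun p => p.2 * f p.1)).sum

theorem helper_unfold (nums : List Int) (cur length : Int) :
    helper nums cur length =
      if cur < 0 then 0
      else if cur = 0 then (if length = 0 then 1 else 0)
      else
        match nums with
        | [] => 0
        | num :: rest => helper rest cur length + helper rest (cur - num) (length - 1) := by
  rw [helper.eq_def]

theorem helper_nil_eq (cur length : Int) :
    helper [] cur length = if cur = 0 ∧ length = 0 then 1 else 0 := by
  rw [helper_unfold]
  split_ifs <;> simp_all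

-- replacing the (unique) entry at key s by (s, v + k) adds k * f s to the weighted sum
theorem sum_map_replace (f : Int × Int → Int) (s : Int × Int) (v k : Int) :
    ∀ (l : List ((Int × Int) × Int)), (l.map (·.1)).Nodup → (s, v) ∈ l →
    dsumF f (l.map (fun p => if p.1 == s then (s, v + k) else p))
      = dsumF f l + k * f s := by
  intro l
  induction l with
  | nil => intro _ h; simp at h
  | cons p t ih =>
    intro hnd hmem
    simp only [List.map_cons, List.nodup_cons] at hnd
    by_cases hp : p.1 = s
    · have hpv : p = (s, v) := by
        rcases List.mem_cons.mp hmem with h | h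
        · exact h.symm
        · exfalso
          exact hnd.1 (by
            have : s ∈ t.map (·.1) := List.mem_map.mpr ⟨(s, v), h, rfl⟩
            simpa [hp] using this)
      have htid : t.map (fun q => if q.1 == s then (s, v + k) else q) = t := by
        have h1 : ∀ q ∈ t, (fun q => if q.1 == s then (s, v + k) else q) q = id q := by
          intro q hq
          have hne : q.1 ≠ s := by
            intro h
            exact hnd.1 (by
              have : q.1 ∈ t.map (·.1) := List.mem_map.mpr ⟨q, hq, rfl⟩
              simpa [hp, h] using this)
          simp [hne]
        simpa using List.map_congr_left h1
      subst hpv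
      simp only [List.map_cons, dsumF, List.sum_cons, htid, beq_self_eq_true, if_pos]
      ring
    · have hmem' : (s, v) ∈ t := by
        rcases List.mem_cons.mp hmem with h | h
        · exact absurd (by rw [← h]) hp
        · exact h
      have hthis := ih hnd.2 hmem'
      have hpb : (p.1 == s) = false := by simpa using hp
      simp only [List.map_cons, hpb, Bool.false_eq_true, if_false, dsumF, List.sum_cons] at hthis ⊢
      rw [hthis]
      ring

-- the 'new[s] = new.get(s, 0) + k' update adds k * f s to the weighted sum of the items
theorem dsumF_insert_add (f : Int × Int → Int) (d : PySem.Dict (Int × Int) Int)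
    (s : Int × Int) (k : Int) (hnd : d.keys.Nodup) :
    dsumF f (d.insert s (d.getD s 0 + k)).items = dsumF f d.items + k * f s := by
  by_cases hc : d.contains s = true
  · have hs : (d.get? s).isSome = true := by
      rw [← PySem.Dict.contains_eq_isSome_get? d s]; exact hc
    obtain ⟨v, hv⟩ := Option.isSome_iff_exists.mp hs
    have hgd : d.getD s 0 = v := PySem.Dict.getD_of_get?_eq_some d 0 hv
    have hmem : (s, v) ∈ d.items := PySem.Dict.mem_items_of_get?_eq_some d hv
    rw [PySem.Dict.items_insert_of_contains d _ hc, hgd]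
    exact sum_map_replace f s v k d.items hnd hmem
  · rw [PySem.Dict.items_insert_of_not_contains d _ (by simpa using hc),
        PySem.Dict.getD_of_not_contains d _ (by simpa using hc)]
    simp [dsumF]

-- one element of B's inner loop over states.items(), as an invariant over the fold
theorem bStep_fold (num : Int) (rest : List Int) :
    ∀ (l : List ((Int × Int) × Int)) (a : PySem.Dict (Int × Int) Int) (t : Int),
    a.keys.Nodup →
    (l.foldl (fun acc p =>
        if p.1.1 < 0 then acc
        else if p.1.1 = 0 then (if p.1.2 = 0 then (acc.1, acc.2 + p.2) else acc)
        else
          let d1 := acc.1.insert p.1 (acc.1.getD p.1 0 + p.2)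
          (d1.insert (p.1.1 - num, p.1.2 - 1) (d1.getD (p.1.1 - num, p.1.2 - 1) 0 + p.2), acc.2))
      (a, t)).1.keys.Nodup ∧
    dsumF (fun s => helper rest s.1 s.2)
        (l.foldl (fun acc p =>
          if p.1.1 < 0 then acc
          else if p.1.1 = 0 then (if p.1.2 = 0 then (acc.1, acc.2 + p.2) else acc)
          else
            let d1 := acc.1.insert p.1 (acc.1.getD p.1 0 + p.2)
            (d1.insert (p.1.1 - num, p.1.2 - 1) (d1.getD (p.1.1 - num, p.1.2 - 1) 0 + p.2), acc.2))
        (a, t)).1.items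
      + (l.foldl (fun acc p =>
          if p.1.1 < 0 then acc
          else if p.1.1 = 0 then (if p.1.2 = 0 then (acc.1, acc.2 + p.2) else acc)
          else
            let d1 := acc.1.insert p.1 (acc.1.getD p.1 0 + p.2)
            (d1.insert (p.1.1 - num, p.1.2 - 1) (d1.getD (p.1.1 - num, p.1.2 - 1) 0 + p.2), acc.2))
        (a, t)).2
      = dsumF (fun s => helper rest s.1 s.2) a.items + t
        + dsumF (fun s => helper (num :: rest) s.1 s.2) l := by
  intro l
  induction l with
  | nil => intro a t hnd; simpa [dsumF] using hnd
  | cons p tl ih =>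
    intro a t hnd
    have hcons : helper (num :: rest) p.1.1 p.1.2 =
        if p.1.1 < 0 then 0
        else if p.1.1 = 0 then (if p.1.2 = 0 then 1 else 0)
        else helper rest p.1.1 p.1.2 + helper rest (p.1.1 - num) (p.1.2 - 1) := by
      rw [helper_unfold]
    by_cases h0 : p.1.1 < 0
    · have := ih a t hnd
      simp only [List.foldl_cons, if_pos h0]
      refine ⟨this.1, ?_⟩
      rw [this.2]
      simp only [dsumF, List.map_cons, List.sum_cons, hcons, if_pos h0]
      ring
    · by_cases h1 : p.1.1 = 0
      · by_cases h2 : p.1.2 = 0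
        · have := ih a (t + p.2) hnd
          simp only [List.foldl_cons, if_neg h0, if_pos h1, if_pos h2]
          refine ⟨this.1, ?_⟩
          rw [this.2]
          simp only [dsumF, List.map_cons, List.sum_cons, hcons, if_neg h0, if_pos h1, if_pos h2]
          ring
        · have := ih a t hnd
          simp only [List.foldl_cons, if_neg h0, if_pos h1, if_neg h2]
          refine ⟨this.1, ?_⟩
          rw [this.2]
          simp only [dsumF, List.map_cons, List.sum_cons, hcons, if_neg h0, if_pos h1, if_neg h2]
          ring
      · have hnd1 : (a.insert p.1 (a.getD p.1 0 + p.2)).keys.Nodup :=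
          PySem.Dict.nodup_keys_insert _ _ _ hnd
        have hnd2 : ((a.insert p.1 (a.getD p.1 0 + p.2)).insert (p.1.1 - num, p.1.2 - 1)
            ((a.insert p.1 (a.getD p.1 0 + p.2)).getD (p.1.1 - num, p.1.2 - 1) 0 + p.2)).keys.Nodup :=
          PySem.Dict.nodup_keys_insert _ _ _ hnd1
        have := ih ((a.insert p.1 (a.getD p.1 0 + p.2)).insert (p.1.1 - num, p.1.2 - 1)
            ((a.insert p.1 (a.getD p.1 0 + p.2)).getD (p.1.1 - num, p.1.2 - 1) 0 + p.2)) t hnd2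
        simp only [List.foldl_cons, if_neg h0, if_neg h1]
        refine ⟨this.1, ?_⟩
        rw [this.2,
            dsumF_insert_add (fun s => helper rest s.1 s.2) _ _ _ hnd1,
            dsumF_insert_add (fun s => helper rest s.1 s.2) _ _ _ hnd]
        simp only [dsumF, List.map_cons, List.sum_cons, hcons, if_neg h0, if_neg h1]
        ring

-- B's final loop computes the weighted sum of the leftover states under helper []
theorem final_fold_eq (l : List ((Int × Int) × Int)) :
    ∀ (t : Int), l.foldl (fun t p => if p.1.1 = 0 ∧ p.1.2 = 0 then t + p.2 else t) t
      = t + dsumF (fun s => helper [] s.1 s.2) l := by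
  induction l with
  | nil => intro t; simp [dsumF]
  | cons p tl ih =>
    intro t
    simp only [List.foldl_cons, dsumF, List.map_cons, List.sum_cons]
    rw [helper_nil_eq]
    split_ifs with h
    · rw [ih]; simp only [dsumF]; ring
    · rw [ih]; simp only [dsumF]; ring

-- the whole outer loop plus the final pass preserves the weighted-sum invariant
theorem main_inv (nums : List Int) :
    ∀ (d : PySem.Dict (Int × Int) Int) (t : Int), d.keys.Nodup →
    (let st := nums.foldl (fun st num => bStep num st) (d, t)
     st.1.items.foldl (fun t p => if p.1.1 = 0 ∧ p.1.2 = 0 then t + p.2 else t) st.2)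
      = dsumF (fun s => helper nums s.1 s.2) d.items + t := by
  induction nums with
  | nil =>
    intro d t _
    simp only [List.foldl_nil]
    rw [final_fold_eq]
    ring
  | cons num rest ih =>
    intro d t hnd
    have hstep := bStep_fold num rest d.items PySem.Dict.empty t PySem.Dict.nodup_keys_empty
    simp only [List.foldl_cons]
    have hb : bStep num (d, t) =
        (d.items.foldl (fun acc p =>
          if p.1.1 < 0 then acc
          else if p.1.1 = 0 then (if p.1.2 = 0 then (acc.1, acc.2 + p.2) else acc)
          else
            let d1 := acc.1.insert p.1 (acc.1.getD p.1 0 + p.2)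
            (d1.insert (p.1.1 - num, p.1.2 - 1) (d1.getD (p.1.1 - num, p.1.2 - 1) 0 + p.2), acc.2))
        (PySem.Dict.empty, t)) := rfl
    rw [hb]
    have := ih (d.items.foldl (fun acc p =>
          if p.1.1 < 0 then acc
          else if p.1.1 = 0 then (if p.1.2 = 0 then (acc.1, acc.2 + p.2) else acc)
          else
            let d1 := acc.1.insert p.1 (acc.1.getD p.1 0 + p.2)
            (d1.insert (p.1.1 - num, p.1.2 - 1) (d1.getD (p.1.1 - num, p.1.2 - 1) 0 + p.2), acc.2))
        (PySem.Dict.empty, t)).1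
      (d.items.foldl (fun acc p =>
          if p.1.1 < 0 then acc
          else if p.1.1 = 0 then (if p.1.2 = 0 then (acc.1, acc.2 + p.2) else acc)
          else
            let d1 := acc.1.insert p.1 (acc.1.getD p.1 0 + p.2)
            (d1.insert (p.1.1 - num, p.1.2 - 1) (d1.getD (p.1.1 - num, p.1.2 - 1) 0 + p.2), acc.2))
        (PySem.Dict.empty, t)).2 hstep.1
    simp only at this ⊢
    rw [this]
    have h2 := hstep.2
    have h0 : dsumF (fun s => helper rest s.1 s.2) (PySem.Dict.empty : PySem.Dict (Int × Int) Int).items = 0 := rfl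
    linarith [h2, h0]

-- ===== VERDICT (by name: the statement is the Claim_ definition above) =====
theorem helper_spec : Claim_equal_helper := by
  intro nums cur length _
  unfold Spec_helper helper_alt
  have hnd : (PySem.Dict.empty.insert ((cur, length) : Int × Int) (1 : Int)).keys.Nodup :=
    PySem.Dict.nodup_keys_insert _ _ _ PySem.Dict.nodup_keys_empty
  have := main_inv nums (PySem.Dict.empty.insert (cur, length) 1) 0 hnd
  simp only at this
  rw [this]
  have hitems : (PySem.Dict.empty.insert ((cur, length) : Int × Int) (1 : Int)).items
      = [((cur, length), 1)] := by rfl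
  rw [hitems]
  simp [dsumF]
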